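-- pv_equiv track=rewrite | github.com/szb37/sbmd_tolerance | src/data_processing.py | get_days_since_last_MD
-- ===== SOURCE A (Python) =====
-- def get_days_since_last_MD(days, days_type, first_MD_days=7, MD_days=None):
--     """Finds nr of days since last MD using the MD_days list"""
--
--     days_since_last_MD = list()
--
--     if days_type == 'MD':
--         for i, day in enumerate(days):
--             if i == 0:
--                 days_since_last_MD.append(first_MD_days)
--             else:
--                 days_since_last_MD.append(day-days[i-1])
--     elif days_type == 'PL':
--         if MD_days is not None and len(MD_days) > 0:
--             for day in days:
--                 # filter MD_days by <day and take max
--                 MD_days_before = list(filter(lambda x: x < day, MD_days))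
--                 if len(MD_days_before) == 0:
--                     continue
--                 MD_day_before = max(MD_days_before)
--                 days_since_last_MD.append(day-MD_day_before)
--
--     return days_since_last_MD
-- ===== SOURCE B (Python) =====
-- def get_days_since_last_MD(days, days_type, first_MD_days=7, MD_days=None):
--     """Finds nr of days since last MD using the MD_days list"""
--
--     if days_type == 'MD':
--         if not days:
--             return []
--         return [first_MD_days] + [b - a for a, b in zip(days, days[1:])]
--
--     if days_type == 'PL' and MD_days:
--         s = sorted(MD_days)
--         out = []
--         for day in days:
--             # binary search: lo = index of first element >= day
--             lo, hi = 0, len(s)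
--             while lo < hi:
--                 mid = (lo + hi) // 2
--                 if s[mid] < day:
--                     lo = mid + 1
--                 else:
--                     hi = mid
--             if lo > 0:
--                 out.append(day - s[lo - 1])
--         return out
--
--     return []
-- ===== Notes on version B (the rewrite author's own statement) =====
-- stated objective: alternative
-- what changed: The PL branch sorts MD_days once and finds the last microdose before each day by binary search instead of filtering the whole MD_days list and taking max for every day; the MD branch becomes a pairwise-difference comprehension over zip(days, days[1:]).
import Mathlib
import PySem

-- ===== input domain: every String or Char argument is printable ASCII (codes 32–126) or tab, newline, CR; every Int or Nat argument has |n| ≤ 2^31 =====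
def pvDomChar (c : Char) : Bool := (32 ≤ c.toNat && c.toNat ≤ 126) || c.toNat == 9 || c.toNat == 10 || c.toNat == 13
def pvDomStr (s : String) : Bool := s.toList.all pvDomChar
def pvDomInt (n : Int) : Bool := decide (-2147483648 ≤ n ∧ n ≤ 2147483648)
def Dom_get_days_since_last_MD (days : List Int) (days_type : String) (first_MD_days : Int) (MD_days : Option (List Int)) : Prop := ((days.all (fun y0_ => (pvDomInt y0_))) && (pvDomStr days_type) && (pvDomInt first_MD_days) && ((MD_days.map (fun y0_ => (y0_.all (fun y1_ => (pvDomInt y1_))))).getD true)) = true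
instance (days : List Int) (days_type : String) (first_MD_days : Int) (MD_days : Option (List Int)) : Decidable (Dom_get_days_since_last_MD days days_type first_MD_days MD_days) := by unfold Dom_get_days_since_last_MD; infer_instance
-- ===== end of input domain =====

-- B: the PL branch sorts MD_days once and binary-searches the last microdose before each day
-- (instead of filter+max per day); the MD branch is a pairwise-difference map over zip(days, days[1:]).


-- ===== PORT A =====
def get_days_since_last_MD (days : List Int) (days_type : String) (first_MD_days : Int) (MD_days : Option (List Int)) : List Int :=
  let days_since_last_MD : List Int := []
  if days_type == "MD" then
    (PySem.List.enumerate days).foldl (fun acc p =>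
      if p.1 == 0 then acc ++ [first_MD_days]
      -- days[i-1]: i ≥ 1 here, so the index is always in range; the none branch is unreachable
      else acc ++ [p.2 - (PySem.List.pyGet? days (p.1 - 1)).getD 0]) days_since_last_MD
  else if days_type == "PL" then
    match MD_days with
    | none => days_since_last_MD
    | some md =>
      if md.length > 0 then
        days.foldl (fun acc day =>
          let MD_days_before := md.filter (fun x => decide (x < day))
          if MD_days_before.length == 0 then acc
          else
            -- max(MD_days_before): the list is nonempty here, so max? is some
            match PySem.List.max? MD_days_before (fun x => x) with
            | some m => acc ++ [day - m]
            | none => acc) days_since_last_MD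
      else days_since_last_MD
  else days_since_last_MD

-- ===== PORT B =====
-- the while lo < hi binary-search loop of Source B
def pvBsearch (s : List Int) (day : Int) (lo hi : Nat) : Nat :=
  if _h : lo < hi then
    let mid := (lo + hi) / 2
    -- s[mid]: lo ≤ mid < hi ≤ len s throughout, so the index is always in range
    if s.getD mid 0 < day then pvBsearch s day (mid + 1) hi else pvBsearch s day lo mid
  else lo
termination_by hi - lo
decreasing_by all_goals omega

def get_days_since_last_MD_alt (days : List Int) (days_type : String) (first_MD_days : Int) (MD_days : Option (List Int)) : List Int :=
  if days_type == "MD" then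
    match days with
    | [] => []
    -- days[1:] is the tail of days here
    | _ :: rest => first_MD_days :: (days.zip rest).map (fun p => p.2 - p.1)
  -- 'MD_days' truthy = not None and nonempty
  else if days_type == "PL" && (MD_days.getD []).length != 0 then
    let s := PySem.List.sorted (MD_days.getD []) (fun x => x) false
    days.foldl (fun out day =>
      let lo := pvBsearch s day 0 s.length
      if lo > 0 then out ++ [day - s.getD (lo - 1) 0] else out) []
  else []

-- ===== PRECONDITION & SPEC =====
def Spec_get_days_since_last_MD (days : List Int) (days_type : String) (first_MD_days : Int) (MD_days : Option (List Int)) (out : List Int) : Prop := out = get_days_since_last_MD_alt days days_type first_MD_days MD_days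
instance (days : List Int) (days_type : String) (first_MD_days : Int) (MD_days : Option (List Int)) (out : List Int) : Decidable (Spec_get_days_since_last_MD days days_type first_MD_days MD_days out) := by unfold Spec_get_days_since_last_MD; infer_instance

-- ===== CLAIM (what is proved, stated in full; the proofs are below) =====
def Claim_equal_get_days_since_last_MD : Prop := ∀ (days : List Int) (days_type : String) (first_MD_days : Int) (MD_days : Option (List Int)), Dom_get_days_since_last_MD days days_type first_MD_days MD_days → Spec_get_days_since_last_MD days days_type first_MD_days MD_days (get_days_since_last_MD days days_type first_MD_days MD_days)

-- ===== LEMMAS AND PROOFS =====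

theorem pv_foldl_append_map {α β : Type} (f : α → β) (l : List α) (acc : List β) :
    l.foldl (fun acc x => acc ++ [f x]) acc = acc ++ l.map f := by
  induction l generalizing acc with
  | nil => simp
  | cons x t ih => simp [List.foldl_cons, ih]

theorem pv_enumerate_getElem (xs : List Int) (start : Int) (i : Nat)
    (h : i < (PySem.List.enumerate xs start).length) (h' : i < xs.length) :
    (PySem.List.enumerate xs start)[i] = (start + i, xs[i]) := by
  induction xs generalizing start i with
  | nil => simp at h'
  | cons x t ih =>
    cases i with
    | zero => simp [PySem.List.enumerate]
    | succ j =>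
      have hj : j < (PySem.List.enumerate t (start + 1)).length := by
        simpa [PySem.List.enumerate] using h
      have hj' : j < t.length := by simpa using h'
      simp [PySem.List.enumerate, ih (start + 1) j hj hj']
      ring

theorem pv_enumerate_length (xs : List Int) (start : Int) :
    (PySem.List.enumerate xs start).length = xs.length := by
  induction xs generalizing start with
  | nil => rfl
  | cons x t ih => simp [PySem.List.enumerate, ih]

-- invariant of the binary-search loop
theorem pvBsearch_inv (s : List Int) (day : Int)
    (hs : List.Pairwise (fun a b => a ≤ b) s) :
    ∀ (n lo hi : Nat), hi - lo ≤ n → lo ≤ hi → hi ≤ s.length →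
      lo ≤ pvBsearch s day lo hi ∧ pvBsearch s day lo hi ≤ hi ∧
      (∀ j, lo ≤ j → j < pvBsearch s day lo hi → ∀ (hj : j < s.length), s[j] < day) ∧
      (∀ j, pvBsearch s day lo hi ≤ j → j < hi → ∀ (hj : j < s.length), day ≤ s[j]) := by
  have mono : ∀ (p q : Nat), p ≤ q → ∀ (hq : q < s.length), ∀ (hp : p < s.length), s[p] ≤ s[q] := by
    intro p q hpq hq hp
    rcases Nat.eq_or_lt_of_le hpq with h | h
    · subst h; rfl
    · exact (List.pairwise_iff_getElem.mp hs) p q hp hq h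
  intro n
  induction n with
  | zero =>
    intro lo hi hn hlohi hhi
    have heq : lo = hi := by omega
    rw [pvBsearch]
    simp only [heq, lt_irrefl, dif_neg, not_false_iff]
    exact ⟨Nat.le_refl _, by omega, by omega, by omega⟩
  | succ n ih =>
    intro lo hi hn hlohi hhi
    rw [pvBsearch]
    by_cases h : lo < hi
    · simp only [h, dif_pos]
      have hmid : (lo + hi) / 2 < hi := by omega
      have hmidlo : lo ≤ (lo + hi) / 2 := by omega
      have hmidlen : (lo + hi) / 2 < s.length := by omega
      by_cases hc : s.getD ((lo + hi) / 2) 0 < day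
      · simp only [hc, if_pos]
        obtain ⟨ha, hb, hcc, hd⟩ := ih ((lo + hi) / 2 + 1) hi (by omega) (by omega) hhi
        refine ⟨by omega, hb, ?_, hd⟩
        intro j hj1 hj2 hj
        by_cases hj3 : (lo + hi) / 2 + 1 ≤ j
        · exact hcc j hj3 hj2 hj
        · have hjle : j ≤ (lo + hi) / 2 := by omega
          have := mono j ((lo + hi) / 2) hjle hmidlen hj
          have hc' : s[(lo + hi) / 2] < day := by
            rwa [List.getD_eq_getElem s 0 hmidlen] at hc
          omega
      · simp only [hc, if_false]
        obtain ⟨ha, hb, hcc, hd⟩ := ih lo ((lo + hi) / 2) (by omega) (by omega) (by omega)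
        refine ⟨ha, by omega, hcc, ?_⟩
        intro j hj1 hj2 hj
        by_cases hj3 : j < (lo + hi) / 2
        · exact hd j hj1 hj3 hj
        · have hc' : day ≤ s[(lo + hi) / 2] := by
            rw [List.getD_eq_getElem s 0 hmidlen] at hc; omega
          have := mono ((lo + hi) / 2) j (by omega) hj hmidlen
          omega
    · simp only [h, dif_neg, not_false_iff]
      exact ⟨Nat.le_refl _, by omega, by omega, by omega⟩

-- per-day agreement of the two PL loop bodies, s := sorted md
theorem pv_step_eq (md : List Int) (day : Int) (acc : List Int) :
    (let MD_days_before := md.filter (fun x => decide (x < day))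
     if MD_days_before.length == 0 then acc
     else
       match PySem.List.max? MD_days_before (fun x => x) with
       | some m => acc ++ [day - m]
       | none => acc)
    =
    (let s := PySem.List.sorted md (fun x => x) false
     let lo := pvBsearch s day 0 s.length
     if lo > 0 then acc ++ [day - s.getD (lo - 1) 0] else acc) := by
  dsimp only
  set s := PySem.List.sorted md (fun x => x) false with hsdef
  have hperm : s.Perm md := PySem.List.sorted_perm md (fun x => x) false
  have hpw : List.Pairwise (fun a b => a ≤ b) s := PySem.List.sorted_pairwise md (fun x => x)
  obtain ⟨h0, hle, hlt, hge⟩ :=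
    pvBsearch_inv s day hpw s.length 0 s.length (by omega) (Nat.zero_le _) (Nat.le_refl _)
  set r := pvBsearch s day 0 s.length with hrdef
  set before := md.filter (fun x => decide (x < day)) with hbdef
  by_cases hr : 0 < r
  · -- r > 0 : both sides append day - s[r-1]
    have hr1 : r - 1 < s.length := by omega
    have hsr : s[r-1] < day := hlt (r-1) (Nat.zero_le _) (by omega) hr1
    have hmem : s[r-1] ∈ md := hperm.mem_iff.mp (List.getElem_mem hr1)
    have hbne : before ≠ [] := by
      intro hb
      have : s[r-1] ∈ before := by
        rw [hbdef, List.mem_filter]; exact ⟨hmem, by simpa using hsr⟩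
      rw [hb] at this; simp at this
    have hlen : ¬ (before.length == 0) = true := by
      simpa using fun h => hbne (List.eq_nil_of_length_eq_zero h)
    obtain ⟨m, hm⟩ : ∃ m, PySem.List.max? before (fun x => x) = some m := by
      cases hmx : PySem.List.max? before (fun x => x) with
      | none => exact absurd ((PySem.List.max?_eq_none_iff _ _).mp hmx) hbne
      | some m => exact ⟨m, rfl⟩
    have hmmem : m ∈ before := PySem.List.max?_mem hm
    have hmmax : ∀ y ∈ before, y ≤ m := by
      intro y hy; exact PySem.List.max?_isMax hm y hy
    -- m = s[r-1]
    have hm1 : s[r-1] ≤ m := hmmax _ (by rw [hbdef, List.mem_filter]; exact ⟨hmem, by simpa using hsr⟩)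
    have hm2 : m ≤ s[r-1] := by
      have hmmd : m ∈ md := (List.mem_filter.mp (hbdef ▸ hmmem)).1
      have hmday : m < day := by
        have := (List.mem_filter.mp (hbdef ▸ hmmem)).2; simpa using this
      have hms : m ∈ s := hperm.mem_iff.mpr hmmd
      obtain ⟨j, hj, hjm⟩ := List.getElem_of_mem hms
      have hjr : j < r := by
        by_contra hc
        have := hge j (by omega) hj hj
        omega
      have := List.pairwise_iff_getElem.mp hpw
      rcases Nat.lt_or_ge j (r-1) with hlt' | hge'
      · have := (List.pairwise_iff_getElem.mp hpw) j (r-1) hj hr1 hlt'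
        omega
      · have : j = r - 1 := by omega
        subst this; omega
    have hms : m = s[r-1] := le_antisymm hm2 hm1
    simp only [hlen, if_neg, hm, hr, if_pos, Bool.not_eq_true]
    rw [hms, List.getD_eq_getElem s 0 hr1]
  · -- r = 0 : filter is empty, neither side appends
    have hr0 : r = 0 := by omega
    have hbe : before = [] := by
      rw [hbdef]
      rw [List.filter_eq_nil_iff]
      intro x hx
      have hxs : x ∈ s := hperm.mem_iff.mpr hx
      obtain ⟨j, hj, hjx⟩ := List.getElem_of_mem hxs
      have := hge j (by omega) hj hj
      simp [← hjx]; omega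
    simp [hbe, hr0]

-- ===== VERDICT (by name: the statement is the Claim_ definition above) =====
theorem get_days_since_last_MD_spec : Claim_equal_get_days_since_last_MD := by
  intro days days_type first_MD_days MD_days _hdom
  unfold Spec_get_days_since_last_MD
  unfold get_days_since_last_MD get_days_since_last_MD_alt
  by_cases hmd : days_type == "MD"
  · simp only [hmd, if_pos]
    have hstep : ∀ (acc : List Int) (p : Int × Int),
        (if (p.1 == 0) = true then acc ++ [first_MD_days]
         else acc ++ [p.2 - (PySem.List.pyGet? days (p.1 - 1)).getD 0]) =
        acc ++ [if (p.1 == 0) = true then first_MD_days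
                else p.2 - (PySem.List.pyGet? days (p.1 - 1)).getD 0] := by
      intro acc p; split_ifs <;> rfl
    simp only [hstep]
    rw [pv_foldl_append_map
      (fun p : Int × Int => if p.1 == 0 then first_MD_days else p.2 - (PySem.List.pyGet? days (p.1 - 1)).getD 0)
      (PySem.List.enumerate days) []]
    cases days with
    | nil => rfl
    | cons d rest =>
      apply List.ext_getElem
      · simp
      · intro i h1 h2
        simp only [List.nil_append] at h1 ⊢
        rw [List.getElem_map]
        rw [pv_enumerate_getElem (d :: rest) 0 i (by simpa using h1)
            (by rw [List.length_map, pv_enumerate_length] at h1; exact h1)]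
        cases i with
        | zero => simp
        | succ j =>
          have hj : j < rest.length := by
            rw [List.length_map, pv_enumerate_length] at h1; simpa using h1
          have hz : (((0:Int) + (j+1:Nat)) == 0) = false := by
            simp; omega
          simp only [hz, Bool.false_eq_true, if_false]
          have hidx : (0:Int) + ((j+1:Nat):Int) - 1 = ((j:Nat):Int) := by push_cast; ring
          rw [hidx, PySem.List.pyGet?_natCast]
          have hjd : j < (d :: rest).length := by simp; omega
          simp only [List.getElem?_eq_getElem hjd, Option.getD_some]
          simp [List.getElem_cons_succ, List.getElem_zip]
  · simp only [hmd, Bool.false_eq_true, if_false]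
    by_cases hpl : days_type == "PL"
    · simp only [hpl, if_pos, Bool.true_and]
      cases MD_days with
      | none => simp
      | some md =>
        by_cases hlen : md.length > 0
        · have hlen' : (md.length != 0) = true := by simp only [bne_iff_ne]; omega
          simp only [hlen, if_pos, Option.getD_some, hlen', if_pos]
          apply List.foldl_ext
          intro acc day _
          exact pv_step_eq md day acc
        · have h0 : md.length = 0 := by omega
          simp [h0]
    · simp [hpl]
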